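-- pv_equiv track=rewrite | github.com/shshsunny/ComputerHomework | 本节课习题/Recursion-1.py | array220
-- ===== SOURCE A (Python) =====
-- def array220(nums, index = None):
--     if index == None:
--         if len(nums) < 2:return False
--         if nums[0] * 10 == nums[1]:return True
--         else: return False or array220(nums[1:])
--     else:
--         if index == 0:
--             return array220(nums)
--         else:
--             return array220(nums[1:], index-1)
-- ===== SOURCE B (Python) =====
-- def array220(nums, index=None):
--     start = 0 if index is None else index
--     for i in range(start, len(nums) - 1):
--         if nums[i] * 10 == nums[i + 1]:
--             return True
--     return False
-- ===== Notes on version B (the rewrite author's own statement) =====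
-- stated objective: faster
-- what changed: Replaced A's recursion that copies a shrinking slice nums[1:] at every step with a single iterative index scan over adjacent pairs, so no list copies and no recursion.
import Mathlib
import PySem

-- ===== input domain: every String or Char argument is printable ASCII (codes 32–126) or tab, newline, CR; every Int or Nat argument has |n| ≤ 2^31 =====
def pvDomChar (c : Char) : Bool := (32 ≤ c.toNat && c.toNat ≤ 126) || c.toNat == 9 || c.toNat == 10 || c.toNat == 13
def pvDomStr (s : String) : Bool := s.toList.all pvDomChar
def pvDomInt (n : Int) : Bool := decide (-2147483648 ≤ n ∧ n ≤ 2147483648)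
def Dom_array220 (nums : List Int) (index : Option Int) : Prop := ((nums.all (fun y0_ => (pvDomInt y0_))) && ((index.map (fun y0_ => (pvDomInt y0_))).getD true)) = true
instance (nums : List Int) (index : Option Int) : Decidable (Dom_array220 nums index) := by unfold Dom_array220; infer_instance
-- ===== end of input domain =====

-- B replaces A's recursion over shrinking slices nums[1:] with one iterative index scan
-- over adjacent pairs (objective: faster — no list copies, no recursion).


-- ===== PORT A =====
-- Literal port of A. The final 'false' branch is a totality guard only: for a negative
-- index Python recurses forever (RecursionError); those inputs are excluded by Pre_.
def array220 (nums : List Int) (index : Option Int) : Bool :=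
  match index with
  | none =>
    if nums.length < 2 then false
    else if PySem.List.pyGetD nums 0 0 * 10 == PySem.List.pyGetD nums 1 0 then true
    else false || array220 (PySem.List.slice nums (some 1) none) none
  | some k =>
    if k == 0 then array220 nums none
    else if 0 < k then array220 (PySem.List.slice nums (some 1) none) (some (k - 1))
    else false
termination_by ((match index with | none => 0 | some k => k.toNat + 1), nums.length)
decreasing_by
  · simp only [PySem.List.slice_from_one]
    right
    cases nums with
    | nil => simp_all
    | cons a t => simp
  · simp_all; omega
  · left; omega

-- ===== PORT B =====
-- Literal port of B: start = 0 if index is None else index; scan range(start, len-1).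
def array220_alt (nums : List Int) (index : Option Int) : Bool :=
  let start : Int := match index with | none => 0 | some k => k
  (PySem.List.pyRange start ((nums.length : Int) - 1) 1).any
    (fun i => PySem.List.pyGetD nums i 0 * 10 == PySem.List.pyGetD nums (i + 1) 0)

-- ===== PRECONDITION & SPEC =====
-- Pre_ excludes index = some k with k < 0: there Python A recurses nums[1:], index-1
-- forever and raises RecursionError (it never returns a value).
def Pre_array220 (nums : List Int) (index : Option Int) : Prop := 0 ≤ index.getD 0
instance (nums : List Int) (index : Option Int) : Decidable (Pre_array220 nums index) := by
  unfold Pre_array220; infer_instance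
def pvWitness_array220 : List Int × Option Int := ([3, 30, 7], some 1)

def Spec_array220 (nums : List Int) (index : Option Int) (out : Bool) : Prop := out = array220_alt nums index
instance (nums : List Int) (index : Option Int) (out : Bool) : Decidable (Spec_array220 nums index out) := by unfold Spec_array220; infer_instance

-- ===== CLAIM (what is proved, stated in full; the proofs are below) =====
def Claim_equal_array220 : Prop := ∀ (nums : List Int) (index : Option Int), Dom_array220 nums index → Pre_array220 nums index → Spec_array220 nums index (array220 nums index)

-- ===== LEMMAS AND PROOFS =====

-- common characterisation: does some adjacent pair (x, y) of the list satisfy x*10 = y?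
def pairScan : List Int → Bool
  | a :: b :: t => (a * 10 == b) || pairScan (b :: t)
  | _ => false

theorem pairScan_short (ns : List Int) (h : ns.length ≤ 1) : pairScan ns = false := by
  match ns with
  | [] => rfl
  | [a] => rfl
  | a :: b :: t => simp at h

theorem arrayA_none (ns : List Int) : array220 ns none = pairScan ns := by
  match ns with
  | [] => rw [array220]; rfl
  | [a] => rw [array220]; rfl
  | a :: b :: t =>
    rw [array220]
    simp only [PySem.List.slice_from_one, List.tail_cons]
    rw [arrayA_none (b :: t)]
    simp [pairScan, PySem.List.pyGetD_zero_cons]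
    by_cases h : a * 10 = b <;> simp [h, PySem.List.pyGetD]

theorem arrayA_some (k : Nat) (ns : List Int) :
    array220 ns (some (k : Int)) = pairScan (ns.drop k) := by
  induction k generalizing ns with
  | zero => rw [array220]; simpa using arrayA_none ns
  | succ m ih =>
    rw [array220]
    have h1 : ((((m : Int) + 1)) == 0) = false := by simp; omega
    simp only [Nat.cast_succ, h1]
    have h2 : (0 : Int) < (m : Int) + 1 := by omega
    rw [if_pos h2]
    simp only [PySem.List.slice_from_one, add_sub_cancel_right]
    rw [ih ns.tail]
    cases ns <;> simp

theorem arrayB_scan (ns : List Int) (k : Nat) :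
    (PySem.List.pyRange (k : Int) ((ns.length : Int) - 1) 1).any
      (fun i => PySem.List.pyGetD ns i 0 * 10 == PySem.List.pyGetD ns (i + 1) 0)
      = pairScan (ns.drop k) := by
  by_cases hk : (ns.length : Int) - 1 ≤ (k : Int)
  · rw [PySem.List.pyRange_one_eq_nil hk]
    rw [pairScan_short (ns.drop k) (by simp; omega)]
    rfl
  · rw [PySem.List.pyRange_one_cons (by omega)]
    have hk1 : k + 1 < ns.length := by omega
    have hk0 : k < ns.length := by omega
    have hcast : ((k : Int) + 1) = ((k + 1 : Nat) : Int) := by push_cast; ring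
    rw [List.any_cons, hcast, arrayB_scan ns (k + 1)]
    have hd : ns.drop k = ns[k] :: ns.drop (k + 1) := List.drop_eq_getElem_cons hk0
    have hd1 : ns.drop (k + 1) = ns[k + 1] :: ns.drop (k + 2) := List.drop_eq_getElem_cons hk1
    rw [hd, hd1, pairScan, ← hd1]
    have hg : PySem.List.pyGetD ns ((k : Int) + 1) 0 = ns[k + 1] := by
      rw [hcast, PySem.List.pyGetD_natCast]
      simp [List.getD_eq_getElem?_getD, hk1]
    simp [hg, PySem.List.pyGetD_natCast, List.getD_eq_getElem?_getD, hk0]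
termination_by ns.length - k
decreasing_by omega

theorem array220_spec : Claim_equal_array220 := by
  intro nums index _ hpre
  unfold Spec_array220 array220_alt
  cases index with
  | none =>
    simp only []
    rw [arrayA_none nums]
    have h := arrayB_scan nums 0
    simp only [Nat.cast_zero, List.drop_zero] at h
    exact h.symm
  | some k =>
    unfold Pre_array220 at hpre
    simp only [Option.getD_some] at hpre
    obtain ⟨n, rfl⟩ : ∃ n : Nat, k = (n : Int) := ⟨k.toNat, by omega⟩
    simp only []
    rw [arrayA_some n nums, ← arrayB_scan nums n]
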